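-- pv_equiv track=rewrite | github.com/hu-ng/cs110-work | Assignment 3/LCS.py | rlts
-- ===== SOURCE A (Python) =====
-- def len_lcs(x, y):
--
--     if type(x) != str or type(y) != str:
--         raise ValueError('Inputs must be strings')
--
--     m = len(x)  # Length of the first string
--     n = len(y)  # Length of the second string
--     c = [[0 for x in range(n + 1)] for y in range(m + 1)]  # Setting up the matrix size (m+1)(n+1)
--     for i in range(m):  # Iterate from x[0] -> x[m - 1]
--         for j in range(n):  # Iterate from y[0] -> y[n - 1]
--             if x[i] == y[j]:  # If the last elements of the strings are the same
--                 c[i + 1][j + 1] = c[i][j] + 1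
--             elif c[i][j + 1] >= c[i + 1][j]:  # If the last elements of the strings are different, case 1
--                 c[i + 1][j + 1] = c[i][j + 1]
--             else:  # Case 2
--                 c[i + 1][j + 1] = c[i + 1][j]
--     # common_sub = ''
--     # while i != -1 and j != -1:
--     #     if c[i + 1][j + 1] == c[i][j] + 1:
--     #         common_sub = common_sub + x[i]
--     #         i -= 1
--     #         j -= 1
--     #     elif c[i][j + 1] >= c[i + 1][j]:
--     #         i -= 1
--     #     else:
--     #         j -= 1
--     # common_sub = common_sub[::-1]
--     return c[m][n]  # Return the length of the LCS of the two full strings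
--
-- def rlts(lst):  # Takes an array of genes (strings)
--     pairs = []  # Contains pairs of genes in 2-element tuples
--     for i in range(len(lst)):  # Essentially creating a table row-wise as in part 2
--         max_lcs = 0  # Initiate a variable to hold the maximum LCS value
--         match = None  # Initiate a variable to reference to the gene with which the current gene has the highest LCS
--         for j in range(len(lst)):
--             if lst[i] == lst[j]:  # Avoid comparing with itself
--                 continue
--             lcs = len_lcs(lst[i], lst[j])  # Uses the len_lcs function in part 1
--             if lcs > max_lcs:  # Checks if the current LCS is the largest
--                 max_lcs = lcs
--                 match = j
--         pairs.append((i + 1, match + 1))  # Appends the pair after going through a row in the table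
--         # To match the output with the tree above, 'i' and 'match' are incremented by 1 before being appended
--         # The relationships are still the same.
--     return pairs
-- ===== SOURCE B (Python) =====
-- def len_lcs(x, y):
--     if type(x) != str or type(y) != str:
--         raise ValueError('Inputs must be strings')
--     m = len(x)
--     n = len(y)
--     c = [[0 for x in range(n + 1)] for y in range(m + 1)]
--     for i in range(m):
--         for j in range(n):
--             if x[i] == y[j]:
--                 c[i + 1][j + 1] = c[i][j] + 1
--             elif c[i][j + 1] >= c[i + 1][j]:
--                 c[i + 1][j + 1] = c[i][j + 1]
--             else:
--                 c[i + 1][j + 1] = c[i + 1][j]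
--     return c[m][n]
--
-- def rlts(lst):
--     n = len(lst)
--     # Phase 1: fill a symmetric score table, computing each unordered pair ONCE
--     # (LCS is symmetric) and mirroring; cells of equal strings stay 0.
--     M = [[0] * n for _ in range(n)]
--     for i in range(n):
--         for j in range(i + 1, n):
--             if lst[i] != lst[j]:
--                 v = len_lcs(lst[i], lst[j])
--                 M[i][j] = v
--                 M[j][i] = v
--     # Phase 2: per row, take the maximum and its first position.
--     out = []
--     for i in range(n):
--         row = M[i]
--         best = max(row)
--         match = row.index(best) if best > 0 else None
--         out.append((i + 1, match + 1))
--     return out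
-- ===== Notes on version B (the rewrite author's own statement) =====
-- stated objective: alternative
-- what changed: B exploits the symmetry of LCS: it fills only the upper triangle of an n×n score table (one len_lcs call per unordered pair, mirrored into the lower triangle) instead of A's full n² inner scan with a running max, then in a separate pass selects per row the first position of the row maximum.
import Mathlib
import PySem

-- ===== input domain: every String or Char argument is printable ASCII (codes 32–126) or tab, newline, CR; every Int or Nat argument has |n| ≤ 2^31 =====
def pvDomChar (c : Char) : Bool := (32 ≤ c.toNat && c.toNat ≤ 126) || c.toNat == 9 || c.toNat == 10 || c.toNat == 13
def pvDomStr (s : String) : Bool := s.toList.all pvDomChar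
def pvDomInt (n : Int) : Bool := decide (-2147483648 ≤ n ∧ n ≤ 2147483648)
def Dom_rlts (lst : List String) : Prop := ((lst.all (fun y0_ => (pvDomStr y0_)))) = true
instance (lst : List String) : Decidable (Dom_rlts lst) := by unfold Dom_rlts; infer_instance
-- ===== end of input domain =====

-- B fills only the upper triangle of the score table (one len_lcs call per unordered pair,
-- mirrored by LCS symmetry), then in a separate pass selects per row the first position of
-- the row maximum (objective: alternative).

-- ===== PORT A =====
-- matrix access helpers: every index used by the Python is in range, so the defaults never fire
def mget (c : List (List Int)) (i j : Nat) : Int := (c.getD i []).getD j 0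
def mset (c : List (List Int)) (i j : Nat) (v : Int) : List (List Int) :=
  c.set i ((c.getD i []).set j v)

def len_lcs (x y : String) : Int :=
  let xs := x.toList
  let ys := y.toList
  let m := xs.length
  let n := ys.length
  let c := (List.range m).foldl (fun c i =>
    (List.range n).foldl (fun c j =>
      if xs.getD i ' ' = ys.getD j ' ' then
        mset c (i+1) (j+1) (mget c i j + 1)
      else if mget c i (j+1) ≥ mget c (i+1) j then
        mset c (i+1) (j+1) (mget c i (j+1))
      else
        mset c (i+1) (j+1) (mget c (i+1) j)) c)
    (List.replicate (m+1) (List.replicate (n+1) (0:Int)))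
  mget c m n

def rlts (lst : List String) : List (Int × Int) :=
  (List.range lst.length).foldl (fun pairs i =>
    let st := (List.range lst.length).foldl (fun (st : Int × Option Nat) j =>
      if lst.getD i "" = lst.getD j "" then st
      else
        let lcs := len_lcs (lst.getD i "") (lst.getD j "")
        if lcs > st.1 then (lcs, some j) else st) ((0:Int), (none : Option Nat))
    -- 'match + 1': Python raises TypeError when match is None; those inputs are outside Pre_rlts
    pairs ++ [((i : Int) + 1, ((st.2.getD 0 : Nat) : Int) + 1)]) []

-- ===== PORT B =====
def rlts_alt (lst : List String) : List (Int × Int) :=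
  let n := lst.length
  -- phase 1: symmetric score table, upper triangle computed, lower triangle mirrored
  let M := (List.range n).foldl (fun M i =>
      (List.range' (i+1) (n - (i+1))).foldl (fun M j =>
        if lst.getD i "" ≠ lst.getD j "" then
          let v := len_lcs (lst.getD i "") (lst.getD j "")
          mset (mset M i j v) j i v
        else M) M)
    (List.replicate n (List.replicate n (0:Int)))
  -- phase 2: per row, the maximum and its first position
  (List.range n).map (fun i =>
    let row := M.getD i []
    let best := (PySem.List.max? row (fun y => y)).getD 0
    -- 'match + 1': Python raises TypeError when match is None; those inputs are outside Pre_rlts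
    let m : Nat := if best > 0 then (PySem.List.index? row best).getD 0 else 0
    ((i : Int) + 1, (m : Int) + 1))

-- ===== PRECONDITION & SPEC =====
-- Pre_ excludes exactly the inputs on which the Python raises TypeError (None + 1): some string
-- has no distinct partner in the list sharing a character with it (LCS > 0 ⟺ a shared character).
def Pre_rlts (lst : List String) : Prop :=
  (lst.all (fun s => lst.any (fun t => t ≠ s ∧ s.toList.any (fun c => t.toList.contains c)))) = true
instance (lst : List String) : Decidable (Pre_rlts lst) := by unfold Pre_rlts; infer_instance
def pvWitness_rlts : List String := ["ab", "b"]

def Spec_rlts (lst : List String) (out : List (Int × Int)) : Prop := out = rlts_alt lst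
instance (lst : List String) (out : List (Int × Int)) : Decidable (Spec_rlts lst out) := by unfold Spec_rlts; infer_instance

-- ===== CLAIM (what is proved, stated in full; the proofs are below) =====
def Claim_equal_rlts : Prop := ∀ (lst : List String), Dom_rlts lst → Pre_rlts lst → Spec_rlts lst (rlts lst)

-- ===== LEMMAS AND PROOFS =====

def pvL (xs ys : List Char) : Nat → Nat → Int
  | 0, _ => 0
  | _+1, 0 => 0
  | i+1, j+1 =>
    if xs.getD i ' ' = ys.getD j ' ' then pvL xs ys i j + 1
    else max (pvL xs ys i (j+1)) (pvL xs ys (i+1) j)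
  termination_by i j => (i, j)

theorem pvL_zero_right (xs ys : List Char) (i : Nat) : pvL xs ys i 0 = 0 := by
  cases i <;> simp [pvL]

theorem pvL_symm_aux (xs ys : List Char) : ∀ (s i j : Nat), i + j ≤ s → pvL xs ys i j = pvL ys xs j i := by
  intro s
  induction s with
  | zero => intro i j h
            have : i = 0 ∧ j = 0 := by omega
            rcases this with ⟨rfl, rfl⟩; simp [pvL]
  | succ s ih =>
    intro i j h
    match i, j with
    | 0, j => rw [pvL_zero_right]; cases j <;> simp [pvL]
    | i+1, 0 => rw [pvL_zero_right]; simp [pvL]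
    | i+1, j+1 =>
      simp only [pvL]
      rw [ih i j (by omega), ih i (j+1) (by omega), ih (i+1) j (by omega), max_comm]
      by_cases hc : xs.getD i ' ' = ys.getD j ' '
      · rw [if_pos hc, if_pos hc.symm]
      · rw [if_neg hc, if_neg (fun he => hc he.symm)]

theorem pvL_symm (xs ys : List Char) (i j : Nat) : pvL xs ys i j = pvL ys xs j i :=
  pvL_symm_aux xs ys (i+j) i j le_rfl

theorem mget_mset_self (c : List (List Int)) (i j : Nat) (v : Int)
    (hi : i < c.length) (hj : j < (c.getD i []).length) :
    mget (mset c i j v) i j = v := by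
  rw [List.getD_eq_getElem?_getD, List.getElem?_eq_getElem hi] at hj
  simp only [Option.getD_some] at hj
  simp [mget, mset, List.getD_eq_getElem?_getD, List.getElem?_set, hi, hj]

theorem mget_mset_ne (c : List (List Int)) (i j a b : Nat) (v : Int)
    (h : a ≠ i ∨ b ≠ j) :
    mget (mset c i j v) a b = mget c a b := by
  rcases h with h | h
  · simp [mget, mset, List.getD_eq_getElem?_getD, List.getElem?_set, (Ne.symm h)]
  · simp only [mget, mset, List.getD_eq_getElem?_getD, List.getElem?_set]
    by_cases hia : i = a
    · subst hia
      by_cases hl : i < c.length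
      · simp [hl, List.getElem?_eq_getElem hl, List.getD_eq_getElem?_getD, List.getElem?_set, (Ne.symm h)]
      · simp [hl]
    · simp [hia]

theorem mset_rows (c : List (List Int)) (i j : Nat) (v : Int) (L : Nat)
    (h : ∀ r ∈ c, r.length = L) : ∀ r ∈ mset c i j v, r.length = L := by
  by_cases hl : i < c.length
  · intro r hr
    rcases List.mem_or_eq_of_mem_set hr with h1 | h1
    · exact h r h1
    · subst h1
      rw [List.length_set]
      exact h _ (by rw [List.getD_eq_getElem?_getD, List.getElem?_eq_getElem hl]; exact c.getElem_mem hl)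
  · rw [mset, List.set_eq_of_length_le (by omega)]
    exact h

theorem mset_length (c : List (List Int)) (i j : Nat) (v : Int) :
    (mset c i j v).length = c.length := by simp [mset]

theorem row_len (c : List (List Int)) (i L : Nat) (hi : i < c.length)
    (h : ∀ r ∈ c, r.length = L) : (c.getD i []).length = L := by
  exact h _ (by rw [List.getD_eq_getElem?_getD, List.getElem?_eq_getElem hi]; exact c.getElem_mem hi)

theorem pvA_inner (xs ys : List Char) (m n i : Nat) (him : i < m)
    (hm : xs.length = m) (hn : ys.length = n) :
    ∀ (k : Nat), k ≤ n → ∀ (c : List (List Int)),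
    c.length = m+1 → (∀ r ∈ c, r.length = n+1) →
    (∀ a b, a ≤ m → b ≤ n → mget c a b = if a ≤ i then pvL xs ys a b else 0) →
    (((List.range k).foldl (fun c j =>
      if xs.getD i ' ' = ys.getD j ' ' then
        mset c (i+1) (j+1) (mget c i j + 1)
      else if mget c i (j+1) ≥ mget c (i+1) j then
        mset c (i+1) (j+1) (mget c i (j+1))
      else
        mset c (i+1) (j+1) (mget c (i+1) j)) c).length = m+1 ∧
    (∀ r ∈ (List.range k).foldl (fun c j =>
      if xs.getD i ' ' = ys.getD j ' ' then
        mset c (i+1) (j+1) (mget c i j + 1)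
      else if mget c i (j+1) ≥ mget c (i+1) j then
        mset c (i+1) (j+1) (mget c i (j+1))
      else
        mset c (i+1) (j+1) (mget c (i+1) j)) c, r.length = n+1) ∧
    (∀ a b, a ≤ m → b ≤ n → mget ((List.range k).foldl (fun c j =>
      if xs.getD i ' ' = ys.getD j ' ' then
        mset c (i+1) (j+1) (mget c i j + 1)
      else if mget c i (j+1) ≥ mget c (i+1) j then
        mset c (i+1) (j+1) (mget c i (j+1))
      else
        mset c (i+1) (j+1) (mget c (i+1) j)) c) a b
      = if a ≤ i ∨ (a = i+1 ∧ 1 ≤ b ∧ b ≤ k) then pvL xs ys a b else 0)) := by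
  intro k
  induction k with
  | zero =>
    intro _ c hlen hrows hc
    refine ⟨by simpa using hlen, by simpa using hrows, ?_⟩
    intro a b ha hb
    simp only [List.range_zero, List.foldl_nil]
    rw [hc a b ha hb]
    split_ifs with h1 h2 h2 <;> first | rfl | omega
  | succ k ih =>
    intro hk c hlen hrows hc
    rw [List.range_succ, List.foldl_append, List.foldl_cons, List.foldl_nil]
    obtain ⟨hlen', hrows', hc'⟩ := ih (by omega) c hlen hrows hc
    set c' := (List.range k).foldl (fun c j =>
      if xs.getD i ' ' = ys.getD j ' ' then
        mset c (i+1) (j+1) (mget c i j + 1)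
      else if mget c i (j+1) ≥ mget c (i+1) j then
        mset c (i+1) (j+1) (mget c i (j+1))
      else
        mset c (i+1) (j+1) (mget c (i+1) j)) c with hc'def
    have hi1 : i + 1 < c'.length := by omega
    have hrow : (c'.getD (i+1) []).length = n+1 := row_len c' (i+1) (n+1) hi1 hrows'
    have hk1 : k + 1 < (c'.getD (i+1) []).length := by omega
    have r1 : mget c' i k = pvL xs ys i k := by
      rw [hc' i k (by omega) (by omega)]; simp
    have r2 : mget c' i (k+1) = pvL xs ys i (k+1) := by
      rw [hc' i (k+1) (by omega) (by omega)]; simp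
    have r3 : mget c' (i+1) k = pvL xs ys (i+1) k := by
      rw [hc' (i+1) k (by omega) (by omega)]
      rcases Nat.eq_zero_or_pos k with rfl | hpos
      · rw [pvL_zero_right]
        split_ifs with h <;> first | rfl | omega
      · rw [if_pos (Or.inr ⟨rfl, hpos, le_refl k⟩)]
    have hw : (if xs.getD i ' ' = ys.getD k ' ' then
        mset c' (i+1) (k+1) (mget c' i k + 1)
      else if mget c' i (k+1) ≥ mget c' (i+1) k then
        mset c' (i+1) (k+1) (mget c' i (k+1))
      else
        mset c' (i+1) (k+1) (mget c' (i+1) k)) = mset c' (i+1) (k+1) (pvL xs ys (i+1) (k+1)) := by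
      rw [r1, r2, r3]
      by_cases hch : xs.getD i ' ' = ys.getD k ' '
      · rw [if_pos hch]
        have : pvL xs ys (i+1) (k+1) = pvL xs ys i k + 1 := by rw [pvL, if_pos hch]
        rw [this]
      · rw [if_neg hch]
        have hmax : pvL xs ys (i+1) (k+1) = max (pvL xs ys i (k+1)) (pvL xs ys (i+1) k) := by
          rw [pvL, if_neg hch]
        by_cases hge : pvL xs ys i (k+1) ≥ pvL xs ys (i+1) k
        · rw [if_pos hge, hmax, max_eq_left hge]
        · rw [if_neg hge, hmax, max_eq_right (by omega)]
    rw [hw]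
    refine ⟨by rw [mset_length]; exact hlen', mset_rows _ _ _ _ _ hrows', ?_⟩
    intro a b ha hb
    by_cases hab : a = i+1 ∧ b = k+1
    · rw [hab.1, hab.2, mget_mset_self c' (i+1) (k+1) _ hi1 hk1, if_pos (by omega)]
    · rw [mget_mset_ne c' (i+1) (k+1) a b _ (by omega), hc' a b ha hb]
      split_ifs with h1 h2 <;> first | rfl | omega

theorem len_lcs_eq_pvL (x y : String) :
    len_lcs x y = pvL x.toList y.toList x.toList.length y.toList.length := by
  set xs := x.toList
  set ys := y.toList
  set m := xs.length
  set n := ys.length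
  have main : ∀ i, i ≤ m →
      (((List.range i).foldl (fun c i =>
        (List.range n).foldl (fun c j =>
          if xs.getD i ' ' = ys.getD j ' ' then
            mset c (i+1) (j+1) (mget c i j + 1)
          else if mget c i (j+1) ≥ mget c (i+1) j then
            mset c (i+1) (j+1) (mget c i (j+1))
          else
            mset c (i+1) (j+1) (mget c (i+1) j)) c)
        (List.replicate (m+1) (List.replicate (n+1) (0:Int)))).length = m+1 ∧
      (∀ r ∈ (List.range i).foldl (fun c i =>
        (List.range n).foldl (fun c j =>
          if xs.getD i ' ' = ys.getD j ' ' then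
            mset c (i+1) (j+1) (mget c i j + 1)
          else if mget c i (j+1) ≥ mget c (i+1) j then
            mset c (i+1) (j+1) (mget c i (j+1))
          else
            mset c (i+1) (j+1) (mget c (i+1) j)) c)
        (List.replicate (m+1) (List.replicate (n+1) (0:Int))), r.length = n+1) ∧
      (∀ a b, a ≤ m → b ≤ n → mget ((List.range i).foldl (fun c i =>
        (List.range n).foldl (fun c j =>
          if xs.getD i ' ' = ys.getD j ' ' then
            mset c (i+1) (j+1) (mget c i j + 1)
          else if mget c i (j+1) ≥ mget c (i+1) j then
            mset c (i+1) (j+1) (mget c i (j+1))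
          else
            mset c (i+1) (j+1) (mget c (i+1) j)) c)
        (List.replicate (m+1) (List.replicate (n+1) (0:Int)))) a b
        = if a ≤ i then pvL xs ys a b else 0)) := by
    intro i
    induction i with
    | zero =>
      intro _
      refine ⟨by simp, by simp, ?_⟩
      intro a b ha hb
      simp only [List.range_zero, List.foldl_nil]
      have : mget (List.replicate (m+1) (List.replicate (n+1) (0:Int))) a b = 0 := by
        simp [mget, List.getD_eq_getElem?_getD, List.getElem?_replicate]
        split_ifs <;> simp
      rw [this]
      split_ifs with h
      · have ha0 : a = 0 := by omega
        subst ha0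
        rw [pvL]
      · rfl
    | succ i ih =>
      intro hi
      rw [List.range_succ, List.foldl_append, List.foldl_cons, List.foldl_nil]
      obtain ⟨hlen, hrows, hc⟩ := ih (by omega)
      obtain ⟨hlen', hrows', hc'⟩ := pvA_inner xs ys m n i (by omega) rfl rfl n le_rfl _ hlen hrows hc
      refine ⟨hlen', hrows', ?_⟩
      intro a b ha hb
      rw [hc' a b ha hb]
      by_cases h : a ≤ i+1
      · rw [if_pos h]
        by_cases hc2 : a ≤ i ∨ (a = i+1 ∧ 1 ≤ b ∧ b ≤ n)
        · rw [if_pos hc2]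
        · rw [if_neg hc2]
          have hab : a = i+1 ∧ b = 0 := by omega
          rw [hab.1, hab.2, pvL_zero_right]
      · rw [if_neg h, if_neg (by omega)]
  obtain ⟨_, _, hc⟩ := main m le_rfl
  show mget _ m n = _
  rw [hc m n le_rfl le_rfl, if_pos le_rfl]

theorem len_lcs_symm (x y : String) : len_lcs x y = len_lcs y x := by
  rw [len_lcs_eq_pvL, len_lcs_eq_pvL, pvL_symm]

def pvV (lst : List String) (i j : Nat) : Int :=
  if lst.getD i "" = lst.getD j "" then 0
  else len_lcs (lst.getD i "") (lst.getD j "")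

-- what B's triangle fill stores (min/max ordering of the pair)

def pvW (lst : List String) (i j : Nat) : Int :=
  if lst.getD i "" = lst.getD j "" then 0
  else len_lcs (lst.getD (min i j) "") (lst.getD (max i j) "")

theorem pvW_eq_pvV (lst : List String) (i j : Nat) : pvW lst i j = pvV lst i j := by
  unfold pvW pvV
  rcases le_total i j with h | h
  · rw [min_eq_left h, max_eq_right h]
  · rw [min_eq_right h, max_eq_left h]
    split_ifs with he
    · rfl
    · exact (len_lcs_symm _ _).symm

theorem pvB_inner (lst : List String) (n i : Nat) (hn : n = lst.length) (hin : i < n) :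
    ∀ (t : Nat), i+1+t ≤ n → ∀ (M : List (List Int)),
    M.length = n → (∀ r ∈ M, r.length = n) →
    (∀ a b, a < n → b < n → mget M a b = if min a b < i then pvW lst a b else 0) →
    (((List.range' (i+1) t).foldl (fun M j =>
        if lst.getD i "" ≠ lst.getD j "" then
          let v := len_lcs (lst.getD i "") (lst.getD j "")
          mset (mset M i j v) j i v
        else M) M).length = n ∧
    (∀ r ∈ (List.range' (i+1) t).foldl (fun M j =>
        if lst.getD i "" ≠ lst.getD j "" then
          let v := len_lcs (lst.getD i "") (lst.getD j "")
          mset (mset M i j v) j i v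
        else M) M, r.length = n) ∧
    (∀ a b, a < n → b < n → mget ((List.range' (i+1) t).foldl (fun M j =>
        if lst.getD i "" ≠ lst.getD j "" then
          let v := len_lcs (lst.getD i "") (lst.getD j "")
          mset (mset M i j v) j i v
        else M) M) a b
      = if min a b < i ∨ (min a b = i ∧ max a b ≤ i + t) then pvW lst a b else 0)) := by
  intro t
  induction t with
  | zero =>
    intro _ M hlen hrows hM
    refine ⟨by simpa using hlen, by simpa using hrows, ?_⟩
    intro a b ha hb
    simp only [List.range'_zero, List.foldl_nil]
    rw [hM a b ha hb]
    by_cases h1 : min a b < i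
    · rw [if_pos h1, if_pos (Or.inl h1)]
    · rw [if_neg h1]
      by_cases h2 : min a b = i ∧ max a b ≤ i + 0
      · rw [if_pos (Or.inr h2)]
        have hab : a = i ∧ b = i := by omega
        rw [hab.1, hab.2]
        unfold pvW
        rw [if_pos rfl]
      · rw [if_neg (by tauto)]
  | succ t ih =>
    intro ht M hlen hrows hM
    rw [List.range'_1_concat, List.foldl_append, List.foldl_cons, List.foldl_nil]
    obtain ⟨hlen', hrows', hM'⟩ := ih (by omega) M hlen hrows hM
    set M' := (List.range' (i+1) t).foldl (fun M j =>
        if lst.getD i "" ≠ lst.getD j "" then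
          let v := len_lcs (lst.getD i "") (lst.getD j "")
          mset (mset M i j v) j i v
        else M) M with hM'def
    set j := i + 1 + t with hjdef
    have hjn : j < n := by omega
    have hij : i < j := by omega
    have hpvWij : pvW lst i j = if lst.getD i "" = lst.getD j "" then 0
        else len_lcs (lst.getD i "") (lst.getD j "") := by
      unfold pvW
      rw [min_eq_left (by omega), max_eq_right (by omega)]
    have hpvWji : pvW lst j i = pvW lst i j := by
      unfold pvW
      rw [min_comm, max_comm]
      split_ifs with h1 h2 h2 <;> first | rfl | (exact absurd h1.symm h2) | (exact absurd h2.symm h1)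
    by_cases hne : lst.getD i "" ≠ lst.getD j ""
    · rw [if_pos hne]
      have hv : pvW lst i j = len_lcs (lst.getD i "") (lst.getD j "") := by
        rw [hpvWij, if_neg hne]
      have hilen : i < (mset M' i j (len_lcs (lst.getD i "") (lst.getD j ""))).length := by
        rw [mset_length]; omega
      have hjlen : j < M'.length := by omega
      have hilen0 : i < M'.length := by omega
      have hrowi : ((mset M' i j (len_lcs (lst.getD i "") (lst.getD j ""))).getD j []).length = n := by
        exact row_len _ j n (by rw [mset_length]; omega)
          (mset_rows _ _ _ _ _ hrows')
      refine ⟨by simp [mset_length, hlen'], mset_rows _ _ _ _ _ (mset_rows _ _ _ _ _ hrows'), ?_⟩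
      intro a b ha hb
      by_cases hab1 : a = j ∧ b = i
      · rw [hab1.1, hab1.2]
        rw [mget_mset_self _ j i _ (by rw [mset_length]; omega) (by rw [hrowi]; omega)]
        rw [if_pos (Or.inr (by omega)), hpvWji, hv]
      · rw [mget_mset_ne _ j i a b _ (by tauto)]
        by_cases hab2 : a = i ∧ b = j
        · rw [hab2.1, hab2.2]
          rw [mget_mset_self M' i j _ hilen0
            (by rw [row_len M' i n hilen0 hrows']; omega)]
          rw [if_pos (Or.inr (by omega)), hv]
        · rw [mget_mset_ne M' i j a b _ (by tauto), hM' a b ha hb]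
          by_cases h1 : min a b < i ∨ (min a b = i ∧ max a b ≤ i + t)
          · rw [if_pos h1, if_pos (by omega)]
          · rw [if_neg h1]
            by_cases h2 : min a b < i ∨ (min a b = i ∧ max a b ≤ i + (t+1))
            · -- then {a,b} = {i, j} with a ≠ b, contradicting hab1/hab2; or a = b = i excluded by h1
              exfalso
              have : (a = i ∧ b = j) ∨ (a = j ∧ b = i) := by omega
              tauto
            · rw [if_neg h2]
    · rw [if_neg hne]
      push_neg at hne
      refine ⟨hlen', hrows', ?_⟩
      intro a b ha hb
      rw [hM' a b ha hb]
      by_cases h1 : min a b < i ∨ (min a b = i ∧ max a b ≤ i + t)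
      · rw [if_pos h1, if_pos (by omega)]
      · rw [if_neg h1]
        by_cases h2 : min a b < i ∨ (min a b = i ∧ max a b ≤ i + (t+1))
        · have : (a = i ∧ b = j) ∨ (a = j ∧ b = i) := by omega
          rw [if_pos h2]
          rcases this with ⟨rfl, rfl⟩ | ⟨rfl, rfl⟩
          · rw [hpvWij, if_pos hne]
          · rw [hpvWji, hpvWij, if_pos hne]
        · rw [if_neg h2]

theorem pvB_matrix (lst : List String) :
    (((List.range lst.length).foldl (fun M i =>
      (List.range' (i+1) (lst.length - (i+1))).foldl (fun M j =>
        if lst.getD i "" ≠ lst.getD j "" then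
          let v := len_lcs (lst.getD i "") (lst.getD j "")
          mset (mset M i j v) j i v
        else M) M)
      (List.replicate lst.length (List.replicate lst.length (0:Int)))).length = lst.length ∧
    (∀ r ∈ (List.range lst.length).foldl (fun M i =>
      (List.range' (i+1) (lst.length - (i+1))).foldl (fun M j =>
        if lst.getD i "" ≠ lst.getD j "" then
          let v := len_lcs (lst.getD i "") (lst.getD j "")
          mset (mset M i j v) j i v
        else M) M)
      (List.replicate lst.length (List.replicate lst.length (0:Int))), r.length = lst.length) ∧
    (∀ a b, a < lst.length → b < lst.length →
      mget ((List.range lst.length).foldl (fun M i =>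
      (List.range' (i+1) (lst.length - (i+1))).foldl (fun M j =>
        if lst.getD i "" ≠ lst.getD j "" then
          let v := len_lcs (lst.getD i "") (lst.getD j "")
          mset (mset M i j v) j i v
        else M) M)
      (List.replicate lst.length (List.replicate lst.length (0:Int)))) a b = pvW lst a b)) := by
  set n := lst.length with hn
  have main : ∀ i, i ≤ n →
      (((List.range i).foldl (fun M i =>
        (List.range' (i+1) (n - (i+1))).foldl (fun M j =>
          if lst.getD i "" ≠ lst.getD j "" then
            let v := len_lcs (lst.getD i "") (lst.getD j "")
            mset (mset M i j v) j i v
          else M) M)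
        (List.replicate n (List.replicate n (0:Int)))).length = n ∧
      (∀ r ∈ (List.range i).foldl (fun M i =>
        (List.range' (i+1) (n - (i+1))).foldl (fun M j =>
          if lst.getD i "" ≠ lst.getD j "" then
            let v := len_lcs (lst.getD i "") (lst.getD j "")
            mset (mset M i j v) j i v
          else M) M)
        (List.replicate n (List.replicate n (0:Int))), r.length = n) ∧
      (∀ a b, a < n → b < n → mget ((List.range i).foldl (fun M i =>
        (List.range' (i+1) (n - (i+1))).foldl (fun M j =>
          if lst.getD i "" ≠ lst.getD j "" then
            let v := len_lcs (lst.getD i "") (lst.getD j "")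
            mset (mset M i j v) j i v
          else M) M)
        (List.replicate n (List.replicate n (0:Int)))) a b
        = if min a b < i then pvW lst a b else 0)) := by
    intro i
    induction i with
    | zero =>
      intro _
      refine ⟨by simp, by simp, ?_⟩
      intro a b ha hb
      simp only [List.range_zero, List.foldl_nil]
      have : mget (List.replicate n (List.replicate n (0:Int))) a b = 0 := by
        simp [mget, List.getD_eq_getElem?_getD, List.getElem?_replicate]
        split_ifs <;> simp
      rw [this, if_neg (by omega)]
    | succ i ih =>
      intro hi
      rw [List.range_succ, List.foldl_append, List.foldl_cons, List.foldl_nil]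
      obtain ⟨hlen, hrows, hM⟩ := ih (by omega)
      obtain ⟨hlen', hrows', hM'⟩ := pvB_inner lst n i hn (by omega) (n - (i+1)) (by omega) _ hlen hrows hM
      refine ⟨hlen', hrows', ?_⟩
      intro a b ha hb
      rw [hM' a b ha hb]
      by_cases h1 : min a b < i ∨ (min a b = i ∧ max a b ≤ i + (n - (i+1)))
      · rw [if_pos h1, if_pos (by omega)]
      · rw [if_neg h1, if_neg (by omega)]
  obtain ⟨h1, h2, h3⟩ := main n le_rfl
  refine ⟨h1, h2, ?_⟩
  intro a b ha hb
  rw [h3 a b ha hb, if_pos (by omega)]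

theorem pv_foldl_max_comm (t : List Int) : ∀ a b : Int, t.foldl max (max a b) = max a (t.foldl max b) := by
  induction t with
  | nil => intro a b; rfl
  | cons c t ih =>
    intro a b
    simp only [List.foldl_cons, max_assoc]
    exact ih a (max b c)

-- A's inner loop, characterised: running max of the scores, first index attaining it

theorem pv_inner (lst : List String) (i : Nat) :
    ∀ (js : List Nat) (b : Int) (o : Option Nat), 0 ≤ b →
    js.foldl (fun (st : Int × Option Nat) j =>
      if lst.getD i "" = lst.getD j "" then st
      else
        let lcs := len_lcs (lst.getD i "") (lst.getD j "")
        if lcs > st.1 then (lcs, some j) else st) (b, o)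
    = ((js.map (pvV lst i)).foldl max b,
       if b < (js.map (pvV lst i)).foldl max b then
         js.find? (fun j => pvV lst i j == (js.map (pvV lst i)).foldl max b)
       else o) := by
  intro js
  induction js with
  | nil => intro b o hb; simp
  | cons j t ih =>
    intro b o hb
    by_cases he : lst.getD i "" = lst.getD j ""
    · have hw : pvV lst i j = 0 := by unfold pvV; rw [if_pos he]
      simp only [List.foldl_cons, List.map_cons, if_pos he, hw]
      rw [max_eq_left hb]
      rw [ih b o hb]
      set M := (t.map (pvV lst i)).foldl max b with hM
      by_cases hbM : b < M
      · rw [if_pos hbM, if_pos hbM, List.find?_cons_of_neg]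
        simp only [hw, beq_iff_eq]
        omega
      · rw [if_neg hbM, if_neg hbM]
    · have hw : pvV lst i j = len_lcs (lst.getD i "") (lst.getD j "") := by unfold pvV; rw [if_neg he]
      simp only [List.foldl_cons, List.map_cons, if_neg he, hw]
      set w := len_lcs (lst.getD i "") (lst.getD j "") with hwdef
      by_cases hlt : w > b
      · simp only [if_pos hlt]
        rw [max_eq_right (le_of_lt hlt)]
        rw [ih w (some j) (le_of_lt (lt_of_le_of_lt hb hlt))]
        set M := (t.map (pvV lst i)).foldl max w with hM
        have hwM : w ≤ M := (PySem.List.le_foldl_max (t.map (pvV lst i)) w).1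
        have hbM : b < M := lt_of_lt_of_le hlt hwM
        rw [if_pos hbM]
        by_cases heq : w = M
        · rw [if_neg (by omega : ¬ w < M), List.find?_cons_of_pos]
          simp [hw, heq]
        · have : w < M := lt_of_le_of_ne hwM heq
          rw [if_pos this, List.find?_cons_of_neg]
          simp only [hw, beq_iff_eq]
          omega
      · simp only [if_neg hlt]
        rw [max_eq_left (by omega : w ≤ b)]
        rw [ih b o hb]
        set M := (t.map (pvV lst i)).foldl max b with hM
        by_cases hbM : b < M
        · rw [if_pos hbM, if_pos hbM, List.find?_cons_of_neg]
          simp only [hw, beq_iff_eq]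
          omega
        · rw [if_neg hbM, if_neg hbM]

theorem pv_find?_range_eq_findIdx? (p : Nat → Bool) (n : Nat) :
    (List.range n).find? p = (List.range n).findIdx? p := by
  induction n with
  | zero => rfl
  | succ n ih =>
    rw [List.range_succ, List.find?_append, List.findIdx?_append, ih]
    by_cases h : p n
    · simp [h]
    · simp [h]

theorem rlts_eq_alt (lst : List String) : rlts lst = rlts_alt lst := by
  unfold rlts rlts_alt
  rw [PySem.List.foldl_append_singleton_eq_map, List.nil_append]
  obtain ⟨hlen, hrows, hMval⟩ := pvB_matrix lst
  apply List.map_congr_left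
  intro i hi
  rw [List.mem_range] at hi
  set n := lst.length with hn
  set M := (List.range n).foldl (fun M i =>
      (List.range' (i+1) (n - (i+1))).foldl (fun M j =>
        if lst.getD i "" ≠ lst.getD j "" then
          let v := len_lcs (lst.getD i "") (lst.getD j "")
          mset (mset M i j v) j i v
        else M) M)
    (List.replicate n (List.replicate n (0:Int))) with hMdef
  have hrowlen : (M.getD i []).length = n := row_len M i n (by omega) hrows
  have hrow : M.getD i [] = (List.range n).map (fun j => pvV lst i j) := by
    apply List.ext_getElem
    · rw [hrowlen, List.length_map, List.length_range]
    · intro j hj1 hj2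
      simp only [List.getElem_map, List.getElem_range]
      have hjn : j < n := by rw [hrowlen] at hj1; exact hj1
      have hval : (M.getD i []).getD j 0 = pvV lst i j := by
        rw [← pvW_eq_pvV]
        exact hMval i j hi hjn
      rw [← List.getD_eq_getElem _ 0 hj1, hval]
  simp only [hrow]
  rw [pv_inner lst i (List.range n) 0 none le_rfl]
  set row := (List.range n).map (pvV lst i) with hrowdef
  set Mx := row.foldl max 0 with hMx
  have hzero : (0:Int) ∈ row := by
    rw [hrowdef]
    refine List.mem_map.mpr ⟨i, List.mem_range.mpr hi, ?_⟩
    unfold pvV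
    rw [if_pos rfl]
  have hbest : (PySem.List.max? row (fun y => y)).getD 0 = Mx := by
    cases hr : row with
    | nil => rw [hr] at hzero; simp at hzero
    | cons x t =>
      rw [PySem.List.max?_id_cons, Option.getD_some, hMx, hr, List.foldl_cons]
      have hz2 : (0:Int) = x ∨ (0:Int) ∈ t := by
        rw [hr] at hzero; exact List.mem_cons.mp hzero
      have h0 : (0:Int) ≤ t.foldl max x := by
        rcases hz2 with h | h
        · exact h ▸ (PySem.List.le_foldl_max t x).1
        · exact (PySem.List.le_foldl_max t x).2 0 h
      calc t.foldl max x = max 0 (t.foldl max x) := (max_eq_right h0).symm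
        _ = t.foldl max (max 0 x) := (pv_foldl_max_comm t 0 x).symm
  rw [hbest]
  by_cases hpos : (0:Int) < Mx
  · rw [if_pos hpos, if_pos hpos]
    have hidx : PySem.List.index? row Mx = (List.range n).find? (fun j => pvV lst i j == Mx) := by
      rw [PySem.List.index?_eq_idxOf?, hrowdef]
      unfold List.idxOf?
      rw [List.findIdx?_map, pv_find?_range_eq_findIdx?]
      rfl
    rw [hidx]
  · rw [if_neg hpos, if_neg hpos]
    rfl

-- ===== VERDICT (by name: the statement is the Claim_ definition above) =====
theorem rlts_spec : Claim_equal_rlts := by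
  intro lst _ _
  unfold Spec_rlts
  exact rlts_eq_alt lst
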